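-- pv_equiv track=rewrite | github.com/Luochenghuang/ToxNet | chem_scripts/chem_scripts.py | prep_symbols
-- ===== SOURCE A (Python) =====
-- def prep_symbols(X_sample, characters, maxlen, total_lines):
--
--     for line in X_sample:
--         total_lines += 1
--         if len(line) > maxlen:
--             maxlen = len(line)
--         for c in line:
--             characters.add(c)
--
--     return(characters, maxlen, total_lines)
-- ===== SOURCE B (Python) =====
-- def prep_symbols(X_sample, characters, maxlen, total_lines):
--     lines = list(X_sample)
--     characters.update("".join(lines))
--     if lines:
--         longest = sorted(len(line) for line in lines)[-1]
--         if longest > maxlen: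
--             maxlen = longest
--     return (characters, maxlen, total_lines + len(lines))
-- ===== Notes on version B (the rewrite author's own statement) =====
-- stated objective: alternative
-- what changed: Replaces A's single fused loop (updating set, max and counter per line) by three independent mechanisms over the materialised line list: one set update with the concatenation ''.join(lines), the maximum obtained as the last element of the sorted length list compared with the seed, and a length-based line count.
import Mathlib
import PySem

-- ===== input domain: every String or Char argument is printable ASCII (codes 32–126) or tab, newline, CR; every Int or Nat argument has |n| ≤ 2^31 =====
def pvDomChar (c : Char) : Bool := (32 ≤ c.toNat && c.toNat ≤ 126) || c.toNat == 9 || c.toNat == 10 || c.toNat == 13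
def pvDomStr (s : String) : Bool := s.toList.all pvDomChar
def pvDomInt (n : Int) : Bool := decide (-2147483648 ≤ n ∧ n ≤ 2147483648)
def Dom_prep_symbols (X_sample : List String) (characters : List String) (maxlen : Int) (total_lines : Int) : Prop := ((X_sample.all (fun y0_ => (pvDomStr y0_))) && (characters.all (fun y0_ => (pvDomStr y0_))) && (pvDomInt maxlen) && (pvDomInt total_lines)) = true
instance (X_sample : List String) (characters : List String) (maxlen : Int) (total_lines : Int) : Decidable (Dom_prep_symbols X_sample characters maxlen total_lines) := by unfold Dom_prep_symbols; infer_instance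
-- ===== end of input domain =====

-- B replaces A's fused per-line loop by: one Set.update with "".join of all lines, a sort of the
-- line lengths whose last element is compared with the seed maxlen, and a length-based line count
-- (simpler decomposition; both mutate `characters` in place in Python — equivalence is about the return value).


-- ===== PORT A =====
def prep_symbols (X_sample : List String) (characters : List String) (maxlen : Int) (total_lines : Int) : List String × Int × Int :=
  X_sample.foldl (fun st line =>
    let tl := st.2.2 + 1
    let ml := if PySem.Str.len line > st.2.1 then PySem.Str.len line else st.2.1
    let ch := line.toList.foldl (fun s c => PySem.Set.add s (String.mk [c])) st.1
    (ch, ml, tl)) (characters, maxlen, total_lines)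

-- ===== PORT B =====
-- B: materialise lines, update the set with "".join(lines), take the last of the sorted lengths, count.
def prep_symbols_alt (X_sample : List String) (characters : List String) (maxlen : Int) (total_lines : Int) : List String × Int × Int :=
  let lines := X_sample
  let ch := PySem.Set.update characters ((PySem.Str.join "" lines).toList.map (fun c => String.mk [c]))
  let ml :=
    if lines.isEmpty then maxlen
    else
      let longest := (PySem.List.pyGet? (PySem.List.sorted (lines.map (fun line => PySem.Str.len line)) (fun x => x) false) (-1)).getD maxlen
      if longest > maxlen then longest else maxlen
  (ch, ml, total_lines + (lines.length : Int))

-- ===== PRECONDITION & SPEC =====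
def Spec_prep_symbols (X_sample : List String) (characters : List String) (maxlen : Int) (total_lines : Int) (out : List String × Int × Int) : Prop := out = prep_symbols_alt X_sample characters maxlen total_lines
instance (X_sample : List String) (characters : List String) (maxlen : Int) (total_lines : Int) (out : List String × Int × Int) : Decidable (Spec_prep_symbols X_sample characters maxlen total_lines out) := by unfold Spec_prep_symbols; infer_instance

-- ===== CLAIM (what is proved, stated in full; the proofs are below) =====
def Claim_equal_prep_symbols : Prop := ∀ (X_sample : List String) (characters : List String) (maxlen : Int) (total_lines : Int), Dom_prep_symbols X_sample characters maxlen total_lines → Spec_prep_symbols X_sample characters maxlen total_lines (prep_symbols X_sample characters maxlen total_lines)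

-- ===== LEMMAS AND PROOFS =====

-- A's fold, split into its three independent components.
lemma prep_symbols_components (X : List String) (ch : List String) (ml tl : Int) :
    prep_symbols X ch ml tl =
      ((X.map String.toList).foldl (fun s cs => cs.foldl (fun s c => PySem.Set.add s (String.mk [c])) s) ch,
       (X.map (fun line => PySem.Str.len line)).foldl (fun a b => if b > a then b else a) ml,
       tl + (X.length : Int)) := by
  induction X generalizing ch ml tl with
  | nil => simp [prep_symbols]
  | cons l ls ih =>
    rw [show prep_symbols (l :: ls) ch ml tl
         = prep_symbols ls
             (l.toList.foldl (fun s c => PySem.Set.add s (String.mk [c])) ch)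
             (if PySem.Str.len l > ml then PySem.Str.len l else ml)
             (tl + 1) from rfl, ih]
    simp only [List.map_cons, List.foldl_cons, List.length_cons]
    refine Prod.ext rfl (Prod.ext rfl ?_)
    show tl + 1 + (ls.length : Int) = tl + ((ls.length : Nat) + 1 : Nat)
    push_cast
    ring

-- intercalating with the empty separator is flattening.
lemma intercalate_nil_eq_flatten (L : List (List Char)) : List.intercalate [] L = L.flatten := by
  induction L with
  | nil => rfl
  | cons a t ih =>
    cases t with
    | nil => simp [List.intercalate]
    | cons b u =>
      simp only [List.intercalate, List.intersperse, List.flatten_cons] at *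
      simp [ih]

-- "".join(lines) as a list of chars is the flattening of the lines.
lemma join_empty_toList (X : List String) :
    (PySem.Str.join "" X).toList = (X.map String.toList).flatten := by
  simp [PySem.Str.toList_join, PySem.Chars.join, intercalate_nil_eq_flatten]

-- last of a sorted (Pairwise ≤) nonempty list absorbs the running max.
lemma foldl_max_sorted_last (S : List Int) (hS : S ≠ []) (hp : S.Pairwise (· ≤ ·)) (m : Int) :
    S.foldl (fun a b => if b > a then b else a) m = if S.getLast hS > m then S.getLast hS else m := by
  induction S generalizing m with
  | nil => simp at hS
  | cons a t ih =>
    rcases t with _ | ⟨b, u⟩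
    · simp
    · have hp' := (List.pairwise_cons.mp hp).2
      have hle : a ≤ (b :: u).getLast (by simp) := by
        exact (List.pairwise_cons.mp hp).1 _ (List.getLast_mem _)
      simp only [List.foldl_cons] at *
      rw [ih (by simp) hp' (if a > m then a else m)]
      simp only [List.getLast_cons (by simp : (b :: u) ≠ [])]
      split_ifs <;> omega

-- foldl max is permutation-invariant.
lemma foldl_max_perm {L L' : List Int} (h : L.Perm L') (m : Int) :
    L.foldl (fun a b => if b > a then b else a) m = L'.foldl (fun a b => if b > a then b else a) m := by
  induction h generalizing m with
  | nil => rfl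
  | cons x _ ih => simp only [List.foldl_cons]; exact ih _
  | swap x y l => simp only [List.foldl_cons]; congr 1; split_ifs <;> omega
  | trans _ _ ih1 ih2 => exact (ih1 m).trans (ih2 m)

-- pyGet? at -1 is the last element.
lemma pyGet?_neg_one (S : List Int) (hS : S ≠ []) :
    PySem.List.pyGet? S (-1) = some (S.getLast hS) := by
  have h1 : 1 ≤ S.length := List.length_pos_of_ne_nil hS
  have h2 : S.length - 1 < S.length := by omega
  simp [PySem.List.pyGet?, PySem.List.pyIdx?, h1, List.getElem?_eq_getElem h2, List.getLast_eq_getElem]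

theorem prep_symbols_spec : Claim_equal_prep_symbols := by
  intro X ch ml tl _
  unfold Spec_prep_symbols prep_symbols_alt
  rw [prep_symbols_components]
  simp only [join_empty_toList]
  refine Prod.ext ?_ (Prod.ext ?_ rfl)
  · -- character set
    show _ = PySem.Set.update ch (((X.map String.toList).flatten).map (fun c => String.mk [c]))
    rw [PySem.Set.update_map_eq_foldl_add, List.foldl_flatten]
  · -- maxlen
    by_cases hX : X = []
    · subst hX; simp
    · have hne : (X.map (fun line => PySem.Str.len line)) ≠ [] := by
        simpa using hX
      set lens := X.map (fun line => PySem.Str.len line) with hlens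
      have hperm : (PySem.List.sorted lens (fun x => x) false).Perm lens :=
        PySem.List.sorted_perm lens (fun x => x) false
      have hSne : PySem.List.sorted lens (fun x => x) false ≠ [] := by
        rw [Ne, PySem.List.sorted_eq_nil_iff]; exact hne
      have hp : (PySem.List.sorted lens (fun x => x) false).Pairwise (· ≤ ·) := by
        simpa using PySem.List.sorted_pairwise lens (fun x => x)
      have hx : X.isEmpty = false := by simp [hX]
      show lens.foldl (fun a b => if b > a then b else a) ml = _
      rw [hx]
      simp only [Bool.false_eq_true, if_false, pyGet?_neg_one _ hSne, Option.getD_some]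
      rw [foldl_max_perm hperm.symm ml, foldl_max_sorted_last _ hSne hp ml]
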